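-- pv_equiv track=rewrite | github.com/NVIDIA/recsys-examples | corelib/dynamicemb/dynamicemb/exportable_tables.py | _derive_grouped_offsets
-- ===== SOURCE A (Python) =====
-- from typing import List, Optional
--
-- def _derive_grouped_offsets(feature_table_map: List[int]) -> List[int]:
--     """Derive boundary-style offsets from a per-feature table-id list.
--
--     For example, ``[0, 0, 1, 2]`` → ``[0, 2, 3, 4]``.
--     The result is analogous to ``table_bucket_offsets_`` in ``LinearBucketTable``.
--     """
--     offsets = [0]
--     prev = feature_table_map[0]
--     for i, tid in enumerate(feature_table_map[1:], start=1):
--         if tid != prev: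
--             offsets.append(i)
--             prev = tid
--     offsets.append(len(feature_table_map))
--     return offsets
-- ===== SOURCE B (Python) =====
-- from itertools import accumulate, groupby
-- from typing import List
--
--
-- def _derive_grouped_offsets(feature_table_map: List[int]) -> List[int]:
--     lengths = [sum(1 for _ in g) for _, g in groupby(feature_table_map)]
--     return list(accumulate(lengths, initial=0))
-- ===== Notes on version B (the rewrite author's own statement) =====
-- stated objective: idiomatic
-- what changed: Replaces A's index-based change-point scan (enumerate over the tail comparing against a prev variable) with a partition into runs via itertools.groupby followed by a prefix sum of run lengths via itertools.accumulate; Pre_ excludes only the empty list, on which A raises IndexError.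
import Mathlib
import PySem

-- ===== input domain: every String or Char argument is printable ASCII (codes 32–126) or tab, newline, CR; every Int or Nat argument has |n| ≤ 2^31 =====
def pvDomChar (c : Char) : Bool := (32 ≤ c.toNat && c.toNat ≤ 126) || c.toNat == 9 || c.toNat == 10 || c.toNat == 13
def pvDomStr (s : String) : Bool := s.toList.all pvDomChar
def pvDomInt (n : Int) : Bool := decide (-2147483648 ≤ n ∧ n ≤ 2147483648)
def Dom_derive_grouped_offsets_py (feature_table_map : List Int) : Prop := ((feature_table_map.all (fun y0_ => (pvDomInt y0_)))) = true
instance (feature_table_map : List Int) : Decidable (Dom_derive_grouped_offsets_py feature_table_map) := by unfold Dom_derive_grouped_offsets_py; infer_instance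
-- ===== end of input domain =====

-- B replaces A's change-point scan with groupby run lengths + prefix sum (idiomatic; same cost).

-- ===== PORT A =====
-- offsets = [0]; prev = m[0]; for i, tid in enumerate(m[1:], 1): if tid != prev: append i; prev = tid
-- offsets.append(len(m))
def derive_grouped_offsets_py (feature_table_map : List Int) : List Int :=
  match feature_table_map with
  | [] => []  -- unreachable: Python raises IndexError here, excluded by Pre_
  | p :: rest =>
    let st :=
      ((rest.zipIdx 1).foldl
        (fun (st : List Int × Int) (pr : Int × Nat) =>
          if pr.1 ≠ st.2 then (st.1 ++ [(pr.2 : Int)], pr.1) else st)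
        (([0] : List Int), p))
    st.1 ++ [((p :: rest).length : Int)]

-- ===== PORT B =====
-- groupby run lengths (helper with current key and running count), then accumulate(lengths, initial=0)
def pvGroupLensAux (cur : Int) (cnt : Int) : List Int → List Int
  | [] => [cnt]
  | y :: ys => if y = cur then pvGroupLensAux cur (cnt + 1) ys else cnt :: pvGroupLensAux y 1 ys

def pvGroupLens : List Int → List Int
  | [] => []
  | x :: xs => pvGroupLensAux x 1 xs

def derive_grouped_offsets_py_alt (feature_table_map : List Int) : List Int :=
  List.scanl (· + ·) 0 (pvGroupLens feature_table_map)

-- ===== PRECONDITION & SPEC =====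
-- Pre_ excludes only the empty list, on which Python A raises IndexError.
def Pre_derive_grouped_offsets_py (feature_table_map : List Int) : Prop := feature_table_map ≠ []
instance (feature_table_map : List Int) : Decidable (Pre_derive_grouped_offsets_py feature_table_map) := by unfold Pre_derive_grouped_offsets_py; infer_instance
def pvWitness_derive_grouped_offsets_py : List Int := ([0, 0, 1, 2] : List Int)

def Spec_derive_grouped_offsets_py (feature_table_map : List Int) (out : List Int) : Prop := out = derive_grouped_offsets_py_alt feature_table_map
instance (feature_table_map : List Int) (out : List Int) : Decidable (Spec_derive_grouped_offsets_py feature_table_map out) := by unfold Spec_derive_grouped_offsets_py; infer_instance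

-- ===== CLAIM (what is proved, stated in full; the proofs are below) =====
def Claim_equal_derive_grouped_offsets_py : Prop := ∀ (feature_table_map : List Int), Dom_derive_grouped_offsets_py feature_table_map → Pre_derive_grouped_offsets_py feature_table_map → Spec_derive_grouped_offsets_py feature_table_map (derive_grouped_offsets_py feature_table_map)

-- ===== LEMMAS AND PROOFS =====

-- the change-point list A's loop appends: indices (as Ints) where the table id changes
def pvChg : List Int → Int → Int → List Int
  | [], _, _ => []
  | t :: ts, prev, i => if t ≠ prev then i :: pvChg ts t (i + 1) else pvChg ts prev (i + 1)

theorem pvFoldA (rest : List Int) : ∀ (i : Nat) (offsets : List Int) (prev : Int),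
    (rest.zipIdx i).foldl
      (fun (st : List Int × Int) (pr : Int × Nat) =>
        if pr.1 ≠ st.2 then (st.1 ++ [(pr.2 : Int)], pr.1) else st)
      (offsets, prev)
    = (offsets ++ pvChg rest prev (i : Int), rest.getLastD prev) := by
  induction rest with
  | nil => intro i offsets prev; simp [pvChg]
  | cons t ts ih =>
    intro i offsets prev
    rw [List.zipIdx_cons, List.foldl_cons]
    by_cases h : t = prev
    · subst h
      rw [show ((if (t, i).1 ≠ ((offsets, t) : List Int × Int).2
            then (((offsets, t) : List Int × Int).1 ++ [((t, i).2 : Int)], (t, i).1)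
            else ((offsets, t) : List Int × Int)) = (offsets, t)) from by simp]
      rw [ih (i + 1) offsets t]
      rw [show pvChg (t :: ts) t (i : Int) = pvChg ts t ((i : Int) + 1) from by simp [pvChg]]
      push_cast
      rw [List.getLastD_cons]
    · rw [show ((if (t, i).1 ≠ ((offsets, prev) : List Int × Int).2
            then (((offsets, prev) : List Int × Int).1 ++ [((t, i).2 : Int)], (t, i).1)
            else ((offsets, prev) : List Int × Int)) = (offsets ++ [(i : Int)], t)) from by simp [h]]
      rw [ih (i + 1) (offsets ++ [(i : Int)]) t]
      rw [show pvChg (t :: ts) prev (i : Int) = (i : Int) :: pvChg ts t ((i : Int) + 1) from by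
        simp [pvChg, h]]
      push_cast
      rw [List.getLastD_cons]
      simp

theorem pvScanB (rest : List Int) : ∀ (cur cnt c : Int),
    List.scanl (· + ·) c (pvGroupLensAux cur cnt rest)
      = c :: (pvChg rest cur (c + cnt) ++ [c + cnt + rest.length]) := by
  induction rest with
  | nil => intro cur cnt c; simp [pvGroupLensAux, pvChg, List.scanl]
  | cons y ys ih =>
    intro cur cnt c
    by_cases h : y = cur
    · subst h
      rw [show pvGroupLensAux y cnt (y :: ys) = pvGroupLensAux y (cnt + 1) ys from by
        simp [pvGroupLensAux]]
      rw [ih y (cnt + 1) c]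
      rw [show pvChg (y :: ys) y (c + cnt) = pvChg ys y (c + cnt + 1) from by simp [pvChg]]
      rw [show c + (cnt + 1) = c + cnt + 1 from by ring]
      rw [show c + cnt + 1 + (ys.length : Int) = c + cnt + ((y :: ys).length : Int) from by
        simp [List.length_cons]; ring]
    · rw [show pvGroupLensAux cur cnt (y :: ys) = cnt :: pvGroupLensAux y 1 ys from by
        simp [pvGroupLensAux, h]]
      rw [List.scanl_cons, ih y 1 (c + cnt)]
      rw [show pvChg (y :: ys) cur (c + cnt) = (c + cnt) :: pvChg ys y (c + cnt + 1) from by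
        simp [pvChg, h]]
      rw [show c + cnt + 1 + (ys.length : Int) = c + cnt + ((y :: ys).length : Int) from by
        simp [List.length_cons]; ring]
      simp

-- ===== VERDICT (by name: the statement is the Claim_ definition above) =====
theorem derive_grouped_offsets_py_spec : Claim_equal_derive_grouped_offsets_py := by
  intro m _ hpre
  unfold Spec_derive_grouped_offsets_py
  match m with
  | [] => exact absurd rfl hpre
  | p :: rest =>
    show derive_grouped_offsets_py (p :: rest) = derive_grouped_offsets_py_alt (p :: rest)
    simp only [derive_grouped_offsets_py, derive_grouped_offsets_py_alt, pvGroupLens]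
    rw [pvFoldA rest 1 [0] p, pvScanB rest p 1 0]
    simp [List.length_cons]
    omega
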